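-- pv_equiv track=rewrite | github.com/cleitonzila/EON_model_traning | OpticalNetworkEnvWithSlicing.py | divide_slots
-- ===== SOURCE A (Python) =====
-- def divide_slots(slot_size, cut_positions):
--     # Add the slot_size to the end of the cut_positions to make it easier to calculate the last part
--     cut_positions_adjusted = cut_positions + [slot_size]
--
--     # Start with 0 to calculate the first part correctly
--     previous_cut = 0
--
--     # Array to store the size of the parts after the cuts
--     parts = []
--
--     # Iterates through the set cutting positions
--     for cut in cut_positions_adjusted:
--         # Calculates the size of the current part and adds it to the parts array
--         # The difference between the current cutting position and the previous one gives the size of the part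
--         parts.append(cut - previous_cut)
--
--         # Updates the previous cut position for the next iteration
--         previous_cut = cut
--
--     return parts
-- ===== SOURCE B (Python) =====
-- def divide_slots(slot_size, cut_positions):
--     # Back-to-front with an explicit stack: pop cuts from the end, emitting each
--     # part from the last one backwards, then reverse the collected parts once.
--     stack = list(cut_positions)
--     parts = []
--     upper = slot_size
--     while stack:
--         cut = stack.pop()
--         parts.append(upper - cut)
--         upper = cut
--     parts.append(upper)
--     parts.reverse()
--     return parts
-- ===== Notes on version B (the rewrite author's own statement) =====
-- stated objective: alternative
-- what changed: Replaces A's forward pass threading a previous_cut accumulator with a back-to-front explicit-stack traversal: cuts are popped from the end, each part is emitted as upper-cut from the last part backwards, and the collected parts are reversed once at the end.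
import Mathlib
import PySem

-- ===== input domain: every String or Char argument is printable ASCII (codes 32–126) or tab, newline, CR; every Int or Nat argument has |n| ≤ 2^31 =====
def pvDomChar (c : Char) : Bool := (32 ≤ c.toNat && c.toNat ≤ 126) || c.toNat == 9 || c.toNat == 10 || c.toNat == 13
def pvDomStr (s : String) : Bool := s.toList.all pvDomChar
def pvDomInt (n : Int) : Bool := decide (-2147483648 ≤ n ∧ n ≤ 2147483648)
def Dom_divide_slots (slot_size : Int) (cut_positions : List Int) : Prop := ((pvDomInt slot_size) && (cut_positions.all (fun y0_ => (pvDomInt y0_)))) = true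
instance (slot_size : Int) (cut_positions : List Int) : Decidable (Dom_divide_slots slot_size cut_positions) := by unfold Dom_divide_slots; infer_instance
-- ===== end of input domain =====

-- B replaces A's forward accumulator loop by a back-to-front explicit-stack traversal (pop cuts from the end, reverse the parts once); alternative decomposition, same cost.
-- ===== PORT A =====
def divide_slots (slot_size : Int) (cut_positions : List Int) : List Int :=
  let cut_positions_adjusted := cut_positions ++ [slot_size]
  let st := cut_positions_adjusted.foldl
    (fun (s : Int × List Int) (cut : Int) => (cut, s.2 ++ [cut - s.1])) (0, [])
  st.2

-- ===== PORT B =====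
-- the while loop: stack.pop() from the end, emit upper - cut, until the stack is empty
def divideSlotsLoop (stack : List Int) (upper : Int) (parts : List Int) : List Int :=
  match _h : stack.getLast? with
  | none => (parts ++ [upper]).reverse
  | some cut => divideSlotsLoop stack.dropLast cut (parts ++ [upper - cut])
termination_by stack.length
decreasing_by
  cases stack with
  | nil => simp at _h
  | cons x xs => simp [List.length_dropLast]

def divide_slots_alt (slot_size : Int) (cut_positions : List Int) : List Int :=
  divideSlotsLoop cut_positions slot_size []

-- ===== PRECONDITION & SPEC =====
def Spec_divide_slots (slot_size : Int) (cut_positions : List Int) (out : List Int) : Prop := out = divide_slots_alt slot_size cut_positions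
instance (slot_size : Int) (cut_positions : List Int) (out : List Int) : Decidable (Spec_divide_slots slot_size cut_positions out) := by unfold Spec_divide_slots; infer_instance

-- ===== CLAIM (what is proved, stated in full; the proofs are below) =====
def Claim_equal_divide_slots : Prop := ∀ (slot_size : Int) (cut_positions : List Int), Dom_divide_slots slot_size cut_positions → Spec_divide_slots slot_size cut_positions (divide_slots slot_size cut_positions)

-- ===== LEMMAS AND PROOFS =====
-- proof-only characterisation: the reversed parts B collects from top boundary `upper` down `l`
def revDiffs (upper : Int) (l : List Int) : List Int :=
  match l with
  | [] => [upper]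
  | c :: rest => (upper - c) :: revDiffs c rest

-- A's fold from state (p, acc): appends the successive differences of p :: l
theorem divide_slots_fold (l : List Int) (p : Int) (acc : List Int) :
    (l.foldl (fun (s : Int × List Int) (cut : Int) => (cut, s.2 ++ [cut - s.1])) (p, acc)).2
      = acc ++ List.zipWith (fun a b => b - a) (p :: l) l := by
  induction l generalizing p acc with
  | nil => simp
  | cons x xs ih => simp [List.foldl, ih, List.append_assoc]

-- the successive-differences characterisation behaves well under appending a final boundary
theorem zip_diff_concat (cuts : List Int) (p last ss : Int) :
    List.zipWith (fun a b => b - a) (p :: (cuts ++ [last, ss])) (cuts ++ [last, ss])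
      = List.zipWith (fun a b => b - a) (p :: (cuts ++ [last])) (cuts ++ [last]) ++ [ss - last] := by
  induction cuts generalizing p with
  | nil => simp
  | cons x xs ih => simp [ih]

-- B's loop consumes the stack from the right, accumulating revDiffs of the reversed stack
theorem divideSlotsLoop_eq (stack : List Int) (upper : Int) (parts : List Int) :
    divideSlotsLoop stack upper parts = (parts ++ revDiffs upper stack.reverse).reverse := by
  induction stack using List.reverseRecOn generalizing upper parts with
  | nil => rw [divideSlotsLoop]; simp [revDiffs]
  | append_singleton xs last ih =>
      rw [divideSlotsLoop]
      split
      · next h => simp at h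
      · next c h =>
          have hc : last = c := by simpa using h
          cases hc
          have hd : (xs ++ [last]).dropLast = xs := by simp
          rw [hd, ih]
          simp [revDiffs, List.append_assoc]

-- A's successive differences, reversed, are exactly revDiffs from the top boundary
theorem zip_diff_rev (cuts : List Int) (ss : Int) :
    List.zipWith (fun a b => b - a) (0 :: (cuts ++ [ss])) (cuts ++ [ss])
      = (revDiffs ss cuts.reverse).reverse := by
  induction cuts using List.reverseRecOn generalizing ss with
  | nil => simp [revDiffs]
  | append_singleton xs last ih =>
      rw [List.append_assoc]
      simp only [List.singleton_append]
      rw [zip_diff_concat xs 0 last ss, ih]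
      simp [revDiffs]

-- ===== VERDICT (by name: the statement is the Claim_ definition above) =====
theorem divide_slots_spec : Claim_equal_divide_slots := by
  intro slot_size cut_positions _
  unfold Spec_divide_slots divide_slots divide_slots_alt
  rw [divideSlotsLoop_eq, divide_slots_fold, zip_diff_rev]
  simp
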